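-- pv_equiv track=rewrite | github.com/mattischneider/advent-of-code | 2015/03.py | get_visited_houses
-- ===== SOURCE A (Python) =====
-- def get_visited_houses(directions: str):
--     current_pos = (0, 0)
--     visited_houses = {current_pos}
--     for d in directions:
--         x, y = current_pos
--         if d == "^":
--             current_pos = (x, y + 1)
--         if d == "v":
--             current_pos = (x, y - 1)
--         if d == ">":
--             current_pos = (x + 1, y)
--         if d == "<":
--             current_pos = (x - 1, y)
--         visited_houses.add(current_pos)
--     return visited_houses
-- ===== SOURCE B (Python) =====
-- def get_visited_houses(directions: str):
--     xs = [0]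
--     for c in directions:
--         xs.append(xs[-1] + (c == ">") - (c == "<"))
--     ys = [0]
--     for c in directions:
--         ys.append(ys[-1] + (c == "^") - (c == "v"))
--     return set(zip(xs, ys))
-- ===== Notes on version B (the rewrite author's own statement) =====
-- stated objective: alternative
-- what changed: B decomposes the walk into two independent per-axis passes: it computes the x prefix sums and the y prefix sums separately via boolean arithmetic, zips them into the trajectory and deduplicates once, instead of A's single stateful walk over a position pair with an if-chain and incremental set insertion.
import Mathlib
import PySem

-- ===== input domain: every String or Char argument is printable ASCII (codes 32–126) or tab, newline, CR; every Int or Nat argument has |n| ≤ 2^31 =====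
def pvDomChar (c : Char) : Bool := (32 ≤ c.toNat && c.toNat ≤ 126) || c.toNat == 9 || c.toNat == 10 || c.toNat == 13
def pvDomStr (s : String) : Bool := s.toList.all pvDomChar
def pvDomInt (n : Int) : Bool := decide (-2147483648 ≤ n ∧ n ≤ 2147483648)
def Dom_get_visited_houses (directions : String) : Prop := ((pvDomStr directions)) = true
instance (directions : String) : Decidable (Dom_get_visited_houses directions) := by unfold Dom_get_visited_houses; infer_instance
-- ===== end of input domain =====

-- B decomposes the walk into two independent per-axis prefix-sum passes (x and y separately,
-- via boolean arithmetic), zips them into the trajectory and deduplicates once (objective: alternative).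

-- ===== PORT A =====
def pvStepA (pos : Int × Int) (d : Char) : Int × Int :=
  let x := pos.1
  let y := pos.2
  let pos := if d = '^' then (x, y + 1) else pos
  let pos := if d = 'v' then (x, y - 1) else pos
  let pos := if d = '>' then (x + 1, y) else pos
  let pos := if d = '<' then (x - 1, y) else pos
  pos

def pvFoldA (st : (Int × Int) × PySem.Set (Int × Int)) (d : Char) :
    (Int × Int) × PySem.Set (Int × Int) :=
  let pos := pvStepA st.1 d
  (pos, PySem.Set.add st.2 pos)

def get_visited_houses (directions : String) : List (Int × Int) :=
  (directions.toList.foldl pvFoldA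
    (((0, 0) : Int × Int), PySem.Set.ofList [((0 : Int), (0 : Int))])).2

-- ===== PORT B =====
-- xs[-1] is always on a nonempty list in Source B (xs starts as [0]), so it is ported as getLastD 0.
def pvAxisX (xs : List Int) (c : Char) : List Int :=
  xs ++ [xs.getLastD 0 + ((if c = '>' then (1 : Int) else 0) - (if c = '<' then 1 else 0))]

def pvAxisY (ys : List Int) (c : Char) : List Int :=
  ys ++ [ys.getLastD 0 + ((if c = '^' then (1 : Int) else 0) - (if c = 'v' then 1 else 0))]

def get_visited_houses_alt (directions : String) : List (Int × Int) :=
  let xs := directions.toList.foldl pvAxisX [0]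
  let ys := directions.toList.foldl pvAxisY [0]
  PySem.Set.ofList (List.zip xs ys)

-- ===== PRECONDITION & SPEC =====
def Spec_get_visited_houses (directions : String) (out : List (Int × Int)) : Prop := out = get_visited_houses_alt directions
instance (directions : String) (out : List (Int × Int)) : Decidable (Spec_get_visited_houses directions out) := by unfold Spec_get_visited_houses; infer_instance

-- ===== CLAIM (what is proved, stated in full; the proofs are below) =====
def Claim_equal_get_visited_houses : Prop := ∀ (directions : String), Dom_get_visited_houses directions → Spec_get_visited_houses directions (get_visited_houses directions)

-- ===== LEMMAS AND PROOFS =====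

def pvDX (c : Char) : Int := (if c = '>' then 1 else 0) - (if c = '<' then 1 else 0)
def pvDY (c : Char) : Int := (if c = '^' then 1 else 0) - (if c = 'v' then 1 else 0)

-- prefix sums of an axis, starting after value a
def pvSums (dc : Char → Int) (a : Int) : List Char → List Int
  | [] => []
  | c :: cs => (a + dc c) :: pvSums dc (a + dc c) cs

-- the positions visited after each step of A's walk
def pvSteps (pos : Int × Int) : List Char → List (Int × Int)
  | [] => []
  | c :: cs => pvStepA pos c :: pvSteps (pvStepA pos c) cs

lemma pvStepA_eq (pos : Int × Int) (c : Char) :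
    pvStepA pos c = (pos.1 + pvDX c, pos.2 + pvDY c) := by
  by_cases h1 : c = '^'
  · subst h1; simp [pvStepA, pvDX, pvDY]
  · by_cases h2 : c = 'v'
    · subst h2; simp [pvStepA, pvDX, pvDY]; omega
    · by_cases h3 : c = '>'
      · subst h3; simp [pvStepA, pvDX, pvDY]
      · by_cases h4 : c = '<'
        · subst h4; simp [pvStepA, pvDX, pvDY]; omega
        · simp [pvStepA, pvDX, pvDY, h1, h2, h3, h4]

lemma pvSet_add_ofList (l : List (Int × Int)) (p : Int × Int) :
    PySem.Set.add (PySem.Set.ofList l) p = PySem.Set.ofList (l ++ [p]) := by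
  simp [PySem.Set.ofList_eq_foldl, List.foldl_append]

-- A's fold collects the start accumulator followed by the visited steps
lemma pvFoldA_eq (cs : List Char) :
    ∀ (pos : Int × Int) (acc : List (Int × Int)),
      (cs.foldl pvFoldA (pos, PySem.Set.ofList acc)).2 =
        PySem.Set.ofList (acc ++ pvSteps pos cs) := by
  induction cs with
  | nil => intro pos acc; simp [pvSteps]
  | cons c cs ih =>
      intro pos acc
      simp only [List.foldl_cons, pvFoldA, pvSet_add_ofList, pvSteps]
      rw [ih]
      simp

-- each axis fold is the start list followed by that axis's prefix sums
lemma pvAxis_eq (dc : Char → Int) (cs : List Char) :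
    ∀ (xs : List Int) (a : Int), xs.getLastD 0 = a →
      cs.foldl (fun xs c => xs ++ [xs.getLastD 0 + dc c]) xs = xs ++ pvSums dc a cs := by
  induction cs with
  | nil => intro xs a _; simp [pvSums]
  | cons c cs ih =>
      intro xs a ha
      simp only [List.foldl_cons, pvSums]
      rw [ha, ih (xs ++ [a + dc c]) (a + dc c) (by simp), List.append_assoc]
      rfl

-- zipping the two axes' prefix sums yields A's step positions
lemma pvZip_sums (cs : List Char) :
    ∀ (a b : Int), List.zip (pvSums pvDX a cs) (pvSums pvDY b cs) = pvSteps (a, b) cs := by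
  induction cs with
  | nil => intro a b; simp [pvSums, pvSteps]
  | cons c cs ih =>
      intro a b
      simp only [pvSums, pvSteps, List.zip_cons_cons, pvStepA_eq]
      rw [ih]

-- ===== VERDICT (by name: the statement is the Claim_ definition above) =====
theorem get_visited_houses_spec : Claim_equal_get_visited_houses := by
  intro directions _
  show _ = _
  have hx : directions.toList.foldl pvAxisX [0] = [0] ++ pvSums pvDX 0 directions.toList :=
    pvAxis_eq pvDX directions.toList [0] 0 rfl
  have hy : directions.toList.foldl pvAxisY [0] = [0] ++ pvSums pvDY 0 directions.toList :=
    pvAxis_eq pvDY directions.toList [0] 0 rfl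
  simp only [get_visited_houses, get_visited_houses_alt]
  rw [hx, hy]
  simp only [List.singleton_append, List.zip_cons_cons, pvZip_sums]
  simpa using pvFoldA_eq directions.toList (0, 0) [((0 : Int), (0 : Int))]
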